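-- pv_equiv track=rewrite | github.com/lrslab/Hammerhead-motif | hammermotif/motif_greedy.py | merge_similar_motifs
-- ===== SOURCE A (Python) =====
-- def degenerate_code(bases):
--     """
--     Map a sorted tuple of bases to an IUPAC degenerate code.
--     For example, ('A', 'T') returns 'W'.
--     """
--     mapping = {
--         ('A',): 'A',
--         ('C',): 'C',
--         ('G',): 'G',
--         ('T',): 'T',
--         ('A', 'C'): 'M',
--         ('A', 'G'): 'R',
--         ('A', 'T'): 'W',
--         ('C', 'G'): 'S',
--         ('C', 'T'): 'Y',
--         ('G', 'T'): 'K',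
--         ('A', 'C', 'G'): 'V',
--         ('A', 'C', 'T'): 'H',
--         ('A', 'G', 'T'): 'D',
--         ('C', 'G', 'T'): 'B',
--         ('A', 'C', 'G', 'T'): 'N'
--     }
--     return mapping.get(tuple(sorted(bases)), 'N')
--
-- def consensus_from_cluster(cluster):
--     """
--     Generate a consensus motif from a list of motifs (all of the same length).
--     At each position, use the set of bases from all motifs to produce a degenerate code.
--     """
--     if not cluster:
--         return ""
--     length = len(cluster[0])
--     consensus = []
--     for i in range(length):
--         letters = {motif[i] for motif in cluster}
--         consensus.append(degenerate_code(letters))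
--     return ''.join(consensus)
--
-- def merge_similar_motifs(motifs, max_distance=1):
--     """
--     Merge similar motifs by clustering those that have Hamming distance <= max_distance,
--     and generate a consensus motif for each cluster.
--     """
--     clusters = []
--     used = set()
--     motifs = list(motifs)
--     for i, m1 in enumerate(motifs):
--         if i in used:
--             continue
--         cluster = [m1]
--         used.add(i)
--         for j in range(i + 1, len(motifs)):
--             m2 = motifs[j]
--             if j in used or len(m1) != len(m2):
--                 continue
--             if sum(a != b for a, b in zip(m1, m2)) <= max_distance:
--                 cluster.append(m2)
--                 used.add(j)
--         clusters.append(cluster)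
--     merged = [consensus_from_cluster(cluster) for cluster in clusters]
--     return merged
-- ===== SOURCE B (Python) =====
-- # Alternative re-implementation: recursive leader/partition clustering (no index
-- # bookkeeping) and table-driven consensus (membership-indexed IUPAC table instead
-- # of sorted-tuple dict lookup).
--
-- _CODE = "?ACMGRSVTWYHKDBN"
--
--
-- def _consensus(cluster):
--     if not cluster:
--         return ""
--     out = []
--     for i in range(len(cluster[0])):
--         col = [m[i] for m in cluster]
--         if any(c not in ('A', 'C', 'G', 'T') for c in col):
--             out.append('N')
--         else:
--             idx = ('A' in col) + 2 * ('C' in col) + 4 * ('G' in col) + 8 * ('T' in col)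
--             out.append(_CODE[idx])
--     return ''.join(out)
--
--
-- def merge_similar_motifs(motifs, max_distance=1):
--     merged = []
--     rest = list(motifs)
--     while rest:
--         leader = rest[0]
--         cluster = [leader]
--         far = []
--         for m in rest[1:]:
--             if len(m) == len(leader) and sum(a != b for a, b in zip(leader, m)) <= max_distance:
--                 cluster.append(m)
--             else:
--                 far.append(m)
--         merged.append(_consensus(cluster))
--         rest = far
--     return merged
-- ===== Notes on version B (the rewrite author's own statement) =====
-- stated objective: alternative
-- what changed: B replaces A's index-based greedy clustering (enumerate + 'used' index set + rescan of the whole tail for every leader) by a recursive partition of the shrinking remainder list (no index bookkeeping, absorbed motifs are never scanned again), and replaces A's per-column set-comprehension + sorted-tuple dict lookup consensus by direct membership tests indexing a 16-entry IUPAC table.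
import Mathlib
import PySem

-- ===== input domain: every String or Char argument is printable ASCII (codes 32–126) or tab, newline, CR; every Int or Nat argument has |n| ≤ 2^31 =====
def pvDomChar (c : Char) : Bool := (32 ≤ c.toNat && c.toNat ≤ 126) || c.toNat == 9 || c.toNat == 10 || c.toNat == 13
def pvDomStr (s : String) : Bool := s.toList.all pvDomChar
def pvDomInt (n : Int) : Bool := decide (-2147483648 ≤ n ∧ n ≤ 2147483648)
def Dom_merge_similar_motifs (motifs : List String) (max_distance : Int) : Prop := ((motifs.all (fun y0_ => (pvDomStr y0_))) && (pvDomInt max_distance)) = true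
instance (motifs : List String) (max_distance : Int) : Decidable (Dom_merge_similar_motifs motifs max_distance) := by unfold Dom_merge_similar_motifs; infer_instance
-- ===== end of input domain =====

-- B replaces A's index/used-set greedy clustering by a recursive leader/partition pass and
-- A's per-column set+sorted-tuple dict consensus by a membership-indexed IUPAC table (objective: alternative).

-- ===== PORT A =====

-- sum(a != b for a, b in zip(x, y))   (identical snippet in both Pythons, shared helper)
def pvHamSum (x y : String) : Int :=
  ((x.toList.zip y.toList).map (fun p => if p.1 ≠ p.2 then (1 : Int) else 0)).sum

-- the literal dict inside degenerate_code (tuple keys -> List Char keys)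
def pvIUPAC : PySem.Dict (List Char) String := PySem.Dict.ofList
  [ (['A'], "A"), (['C'], "C"), (['G'], "G"), (['T'], "T"),
    (['A', 'C'], "M"), (['A', 'G'], "R"), (['A', 'T'], "W"), (['C', 'G'], "S"),
    (['C', 'T'], "Y"), (['G', 'T'], "K"),
    (['A', 'C', 'G'], "V"), (['A', 'C', 'T'], "H"), (['A', 'G', 'T'], "D"),
    (['C', 'G', 'T'], "B"), (['A', 'C', 'G', 'T'], "N") ]

-- mapping.get(tuple(sorted(bases)), 'N')
def degenerate_code (bases : PySem.Set Char) : String :=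
  pvIUPAC.getD (PySem.List.sorted bases (fun x => x)) "N"

-- consensus_from_cluster: per position i, letters = {motif[i] for motif in cluster}
def consensus_from_cluster (cluster : List String) : String :=
  if cluster = [] then ""
  else
    PySem.Str.join ""
      ((PySem.List.pyRange 0 (PySem.Str.len (PySem.List.pyGetD cluster 0 ""))).foldl
        (fun consensus i =>
          consensus ++
            [degenerate_code (PySem.Set.ofList
              (cluster.map (fun motif => (PySem.Str.pyGet? motif i).getD ' ')))])
        [])

-- inner loop: for j in range(i+1, len(motifs)): ...
def innerA (motifs : List String) (m1 : String) (d : Int) :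
    List Int → List String → PySem.Set Int → List String × PySem.Set Int
  | [], cluster, used => (cluster, used)
  | j :: js, cluster, used =>
    let m2 := PySem.List.pyGetD motifs j ""
    if PySem.Set.contains used j || (PySem.Str.len m1 != PySem.Str.len m2) then
      innerA motifs m1 d js cluster used
    else if pvHamSum m1 m2 ≤ d then
      innerA motifs m1 d js (cluster ++ [m2]) (PySem.Set.add used j)
    else
      innerA motifs m1 d js cluster used

-- outer loop: for i, m1 in enumerate(motifs): ...
def outerA (motifs : List String) (d : Int) :
    List (Int × String) → List (List String) → PySem.Set Int → List (List String)
  | [], clusters, _ => clusters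
  | (i, m1) :: rest, clusters, used =>
    if PySem.Set.contains used i then
      outerA motifs d rest clusters used
    else
      let r := innerA motifs m1 d (PySem.List.pyRange (i + 1) (PySem.List.len motifs))
                 [m1] (PySem.Set.add used i)
      outerA motifs d rest (clusters ++ [r.1]) r.2

def merge_similar_motifs (motifs : List String) (max_distance : Int) : List String :=
  (outerA motifs max_distance (PySem.List.enumerate motifs) [] PySem.Set.empty).map
    consensus_from_cluster

-- ===== PORT B =====

def pvCODE : String := "?ACMGRSVTWYHKDBN"

-- _consensus: per position, index the IUPAC table by base membership of the column
def consensusB (cluster : List String) : String :=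
  if cluster = [] then ""
  else
    PySem.Str.join ""
      ((PySem.List.pyRange 0 (PySem.Str.len (PySem.List.pyGetD cluster 0 ""))).foldl
        (fun out i =>
          out ++
            [let col := cluster.map (fun m => (PySem.Str.pyGet? m i).getD ' ')
             if col.any (fun c => !(c == 'A' || c == 'C' || c == 'G' || c == 'T')) then "N"
             else
               String.ofList [(PySem.Str.pyGet? pvCODE
                 ((if 'A' ∈ col then (1 : Int) else 0) + 2 * (if 'C' ∈ col then 1 else 0) +
                   4 * (if 'G' ∈ col then 1 else 0) + 8 * (if 'T' ∈ col then 1 else 0))).getD ' ']])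
        [])

-- the for-loop over rest[1:]: partition into cluster members and the untouched rest
def splitB (leader : String) (d : Int) : List String → List String × List String
  | [] => ([], [])
  | m :: ms =>
    let r := splitB leader d ms
    if PySem.Str.len m = PySem.Str.len leader ∧ pvHamSum leader m ≤ d then (m :: r.1, r.2)
    else (r.1, m :: r.2)

-- termination fact the port's recursion cites: the untouched rest is no longer than the input
theorem splitB_snd_length_le (leader : String) (d : Int) :
    ∀ ms : List String, (splitB leader d ms).2.length ≤ ms.length := by
  intro ms
  induction ms with
  | nil => simp [splitB]
  | cons m ms ih =>
    simp only [splitB]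
    split
    · exact Nat.le_succ_of_le ih
    · simpa using Nat.succ_le_succ ih

-- the while-rest loop
def mergeB (d : Int) : List String → List String
  | [] => []
  | leader :: rest =>
    consensusB (leader :: (splitB leader d rest).1) :: mergeB d (splitB leader d rest).2
  termination_by ms => ms.length
  decreasing_by
    exact Nat.lt_succ_of_le (splitB_snd_length_le leader d rest)

def merge_similar_motifs_alt (motifs : List String) (max_distance : Int) : List String :=
  mergeB max_distance motifs

-- ===== PRECONDITION & SPEC =====
def Spec_merge_similar_motifs (motifs : List String) (max_distance : Int) (out : List String) : Prop := out = merge_similar_motifs_alt motifs max_distance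
instance (motifs : List String) (max_distance : Int) (out : List String) : Decidable (Spec_merge_similar_motifs motifs max_distance out) := by unfold Spec_merge_similar_motifs; infer_instance

-- ===== CLAIM (what is proved, stated in full; the proofs are below) =====
def Claim_equal_merge_similar_motifs : Prop := ∀ (motifs : List String) (max_distance : Int), Dom_merge_similar_motifs motifs max_distance → Spec_merge_similar_motifs motifs max_distance (merge_similar_motifs motifs max_distance)

-- ===== LEMMAS AND PROOFS =====

-- the clusters B's recursion carves out of the remaining list (proof-only skeleton of mergeB)
def clustersB (d : Int) : List String → List (List String)
  | [] => []
  | m :: ms => (m :: (splitB m d ms).1) :: clustersB d (splitB m d ms).2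
  termination_by ms => ms.length
  decreasing_by
    exact Nat.lt_succ_of_le (splitB_snd_length_le m d ms)

theorem mergeB_eq_map (d : Int) : ∀ ms : List String, mergeB d ms = (clustersB d ms).map consensusB := by
  intro ms
  induction hn : ms.length using Nat.strong_induction_on generalizing ms with
  | _ n ih =>
    cases ms with
    | nil => simp [mergeB, clustersB]
    | cons leader rest =>
      rw [mergeB, clustersB]
      simp only [List.map_cons]
      subst hn
      rw [ih _ (Nat.lt_succ_of_le (splitB_snd_length_le leader d rest)) _ rfl]

-- the sorted IUPAC key of a column, named: any strictly increasing list with the same members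
theorem sorted_set_eq (col target : List Char) (hnd : target.Nodup)
    (hlt : target.Pairwise (· < ·)) (hmem : ∀ a, a ∈ target ↔ a ∈ col) :
    PySem.List.sorted (PySem.Set.ofList col) (fun x => x) = target := by
  apply PySem.List.sorted_eq_of_perm_of_pairwise_lt
  · exact (List.perm_ext_iff_of_nodup hnd (PySem.Set.nodup_ofList col)).2
      (fun a => (hmem a).trans (PySem.Set.mem_ofList col a).symm)
  · exact hlt

-- per-column agreement of the two consensus codes
theorem col_eq (col : List Char) (hne : col ≠ []) :
    degenerate_code (PySem.Set.ofList col) =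
      (if col.any (fun c => !(c == 'A' || c == 'C' || c == 'G' || c == 'T')) then "N"
       else
         String.ofList [(PySem.Str.pyGet? pvCODE
           ((if 'A' ∈ col then (1 : Int) else 0) + 2 * (if 'C' ∈ col then 1 else 0) +
             4 * (if 'G' ∈ col then 1 else 0) + 8 * (if 'T' ∈ col then 1 else 0))).getD ' ']) := by
  by_cases hany : col.any (fun c => !(c == 'A' || c == 'C' || c == 'G' || c == 'T')) = true
  · rw [if_pos hany]
    obtain ⟨c, hc, hcp⟩ := List.any_eq_true.1 hany
    have hnot : ¬(c = 'A' ∨ c = 'C' ∨ c = 'G' ∨ c = 'T') := by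
      simp only [Bool.not_eq_eq_eq_not, Bool.not_true, Bool.or_eq_false_iff, beq_eq_false_iff_ne,
        ne_eq] at hcp
      tauto
    unfold degenerate_code
    rw [PySem.Dict.getD_eq_get?_getD]
    have hkey : PySem.List.sorted (PySem.Set.ofList col) (fun x => x) ∉ pvIUPAC.keys := by
      intro hmem
      have hck : c ∈ PySem.List.sorted (PySem.Set.ofList col) (fun x => x) :=
        (PySem.List.mem_sorted _ _ _ c).2 ((PySem.Set.mem_ofList col c).2 hc)
      have hkeys : pvIUPAC.keys =
          [['A'], ['C'], ['G'], ['T'], ['A','C'], ['A','G'], ['A','T'], ['C','G'], ['C','T'],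
           ['G','T'], ['A','C','G'], ['A','C','T'], ['A','G','T'], ['C','G','T'], ['A','C','G','T']] := by
        decide
      rw [hkeys] at hmem
      simp only [List.mem_cons, List.not_mem_nil, or_false] at hmem
      rcases hmem with h|h|h|h|h|h|h|h|h|h|h|h|h|h|h <;>
        (rw [h] at hck; simp only [List.mem_cons, List.not_mem_nil, or_false] at hck; tauto)
    rw [(PySem.Dict.get?_eq_none_iff_not_mem_keys _ _).2 hkey]
    rfl
  · rw [if_neg hany]
    rw [Bool.not_eq_true] at hany
    have hall : ∀ c ∈ col, c = 'A' ∨ c = 'C' ∨ c = 'G' ∨ c = 'T' := by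
      intro c hc
      have := List.any_eq_false.1 hany c hc
      rw [Bool.not_eq_true, Bool.not_eq_false', Bool.or_eq_true, Bool.or_eq_true,
        Bool.or_eq_true, beq_iff_eq, beq_iff_eq, beq_iff_eq, beq_iff_eq] at this
      tauto
    have hsorted : PySem.List.sorted (PySem.Set.ofList col) (fun x => x) =
        (if 'A' ∈ col then ['A'] else []) ++ (if 'C' ∈ col then ['C'] else []) ++
          (if 'G' ∈ col then ['G'] else []) ++ (if 'T' ∈ col then ['T'] else []) := by
      apply sorted_set_eq
      · split_ifs <;> decide
      · split_ifs <;> decide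
      · intro a
        constructor
        · intro h
          simp only [List.append_assoc, List.mem_append] at h
          rcases h with h | h | h | h <;> (revert h; split <;> simp_all)
        · intro ha
          rcases hall a ha with rfl | rfl | rfl | rfl <;>
            simp [List.mem_append, ha]
    unfold degenerate_code
    rw [hsorted]
    obtain ⟨c0, hc0⟩ : ∃ c0, c0 ∈ col := by
      cases col with
      | nil => exact absurd rfl hne
      | cons x xs => exact ⟨x, List.mem_cons_self⟩
    split_ifs with h1 h2 h3 h4 <;> try decide
    all_goals (rcases hall c0 hc0 with rfl | rfl | rfl | rfl <;> tauto)

-- the two consensus functions agree on every cluster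
theorem consensus_eq (cluster : List String) :
    consensus_from_cluster cluster = consensusB cluster := by
  by_cases hc : cluster = []
  · simp [consensus_from_cluster, consensusB, hc]
  · simp only [consensus_from_cluster, consensusB, if_neg hc]
    congr 1
    rw [PySem.List.foldl_append_singleton_eq_map, PySem.List.foldl_append_singleton_eq_map,
      List.nil_append, List.nil_append]
    apply List.map_congr_left
    intro i _
    exact col_eq _ (by simpa using hc)

-- the motifs at indices ≥ k whose index is not yet used, in order
def remFrom (motifs : List String) (used : PySem.Set Int) (k : Nat) : List String :=
  ((PySem.List.pyRange (k : Int) (motifs.length : Int)).filter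
      (fun j => !PySem.Set.contains used j)).map (fun j => PySem.List.pyGetD motifs j "")

theorem remFrom_stop (motifs : List String) (used : PySem.Set Int) (k : Nat)
    (h : motifs.length ≤ k) : remFrom motifs used k = [] := by
  unfold remFrom
  rw [PySem.List.pyRange_one_eq_nil (by exact_mod_cast h)]
  rfl

theorem remFrom_cons (motifs : List String) (used : PySem.Set Int) (k : Nat)
    (h : k < motifs.length) :
    remFrom motifs used k =
      (if (k : Int) ∈ used then [] else [motifs[k]]) ++ remFrom motifs used (k + 1) := by
  unfold remFrom
  rw [PySem.List.pyRange_one_cons (by exact_mod_cast h)]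
  have hcast : ((k : Int) + 1) = ((k + 1 : Nat) : Int) := by push_cast; ring
  rw [hcast, List.filter_cons]
  by_cases hk : (k : Int) ∈ used
  · simp [hk]
  · simp [hk, PySem.List.pyGetD_natCast, List.getElem?_eq_getElem h]

theorem remFrom_congr (motifs : List String) (u u' : PySem.Set Int) (k : Nat)
    (h : ∀ j : Int, (k : Int) ≤ j → (j ∈ u ↔ j ∈ u')) :
    remFrom motifs u k = remFrom motifs u' k := by
  unfold remFrom
  congr 1
  apply List.filter_congr
  intro j hj
  have hk := (PySem.List.mem_pyRange_one.1 hj).1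
  have hiff := h j hk
  by_cases hju : j ∈ u
  · rw [(PySem.Set.contains_iff u j).2 hju, (PySem.Set.contains_iff u' j).2 (hiff.1 hju)]
  · have h1 : PySem.Set.contains u j = false := by
      rw [← Bool.not_eq_true, PySem.Set.contains_iff]; exact hju
    have h2 : PySem.Set.contains u' j = false := by
      rw [← Bool.not_eq_true, PySem.Set.contains_iff]; exact fun hx => hju (hiff.2 hx)
    rw [h1, h2]

theorem innerA_spec (motifs : List String) (m1 : String) (d : Int) :
    ∀ (n k : Nat) (cluster : List String) (used : PySem.Set Int),
      motifs.length ≤ k + n →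
      (innerA motifs m1 d (PySem.List.pyRange (k : Int) (PySem.List.len motifs)) cluster used).1
          = cluster ++ (splitB m1 d (remFrom motifs used k)).1
      ∧ remFrom motifs
          (innerA motifs m1 d (PySem.List.pyRange (k : Int) (PySem.List.len motifs)) cluster used).2 k
          = (splitB m1 d (remFrom motifs used k)).2
      ∧ (∀ x : Int, x ∈ used →
          x ∈ (innerA motifs m1 d (PySem.List.pyRange (k : Int) (PySem.List.len motifs)) cluster used).2)
      ∧ (∀ x : Int,
          x ∈ (innerA motifs m1 d (PySem.List.pyRange (k : Int) (PySem.List.len motifs)) cluster used).2 →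
          x ∈ used ∨ (k : Int) ≤ x) := by
  intro n
  induction n with
  | zero =>
    intro k cluster used hkn
    have hnil : PySem.List.pyRange (k : Int) (PySem.List.len motifs) = [] := by
      rw [PySem.List.len_eq]
      exact PySem.List.pyRange_one_eq_nil (by exact_mod_cast (by omega : motifs.length ≤ k))
    rw [hnil, remFrom_stop motifs used k (by omega)]
    exact ⟨by simp [innerA, splitB], by
        simp only [innerA, splitB]
        exact remFrom_stop motifs used k (by omega),
      fun x hx => hx, fun x hx => Or.inl hx⟩
  | succ n ih =>
    intro k cluster used hkn
    by_cases hstop : motifs.length ≤ k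
    · have hnil : PySem.List.pyRange (k : Int) (PySem.List.len motifs) = [] := by
        rw [PySem.List.len_eq]
        exact PySem.List.pyRange_one_eq_nil (by exact_mod_cast hstop)
      rw [hnil, remFrom_stop motifs used k hstop]
      exact ⟨by simp [innerA, splitB], by
          simp only [innerA, splitB]
          exact remFrom_stop motifs used k hstop,
        fun x hx => hx, fun x hx => Or.inl hx⟩
    · rw [not_le] at hstop
      have hrange : PySem.List.pyRange (k : Int) (PySem.List.len motifs) =
          (k : Int) :: PySem.List.pyRange ((k + 1 : Nat) : Int) (PySem.List.len motifs) := by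
        rw [PySem.List.pyRange_one_cons
          (by rw [PySem.List.len_eq]; exact_mod_cast hstop)]
        norm_num
      have hm2 : PySem.List.pyGetD motifs (k : Int) "" = motifs[k] := by
        simp [PySem.List.pyGetD_natCast, List.getElem?_eq_getElem hstop]
      rw [hrange]
      by_cases hused : (k : Int) ∈ used
      · have hc : PySem.Set.contains used (k : Int) = true :=
          (PySem.Set.contains_iff used _).2 hused
        simp only [innerA, hc, Bool.true_or, if_true]
        obtain ⟨IH1, IH2, IH3, IH4⟩ := ih (k + 1) cluster used (by omega)
        rw [remFrom_cons motifs used k hstop, if_pos hused, List.nil_append]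
        refine ⟨IH1, ?_, IH3, fun x hx => ?_⟩
        · rw [remFrom_cons motifs _ k hstop, if_pos (IH3 _ hused), List.nil_append]
          exact IH2
        · rcases IH4 x hx with h | h
          · exact Or.inl h
          · right; push_cast at h ⊢; omega
      · have hc : PySem.Set.contains used (k : Int) = false := by
          rw [← Bool.not_eq_true, PySem.Set.contains_iff]; exact hused
        rw [remFrom_cons motifs used k hstop, if_neg hused, List.singleton_append]
        by_cases hlen : PySem.Str.len m1 = PySem.Str.len motifs[k]
        · have hbne : (PySem.Str.len m1 != PySem.Str.len motifs[k]) = false := by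
            rw [bne_eq_false_iff_eq]; exact hlen
          by_cases hd : pvHamSum m1 motifs[k] ≤ d
          · -- joins the cluster
            simp only [innerA, hm2, hc, hbne, Bool.or_self, Bool.false_eq_true, if_false]
            rw [if_pos hd]
            obtain ⟨IH1, IH2, IH3, IH4⟩ := ih (k + 1) (cluster ++ [motifs[k]]) (PySem.Set.add used (k : Int)) (by omega)
            have hrem : remFrom motifs (PySem.Set.add used (k : Int)) (k + 1) = remFrom motifs used (k + 1) := by
              apply remFrom_congr
              intro j hj
              rw [PySem.Set.mem_add]
              constructor
              · rintro (hju | rfl)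
                · exact hju
                · exfalso; push_cast at hj; omega
              · exact Or.inl
            rw [hrem] at IH1 IH2
            have hk_in : (k : Int) ∈ (innerA motifs m1 d
                (PySem.List.pyRange ((k + 1 : Nat) : Int) (PySem.List.len motifs))
                (cluster ++ [motifs[k]]) (PySem.Set.add used (k : Int))).2 :=
              IH3 _ ((PySem.Set.mem_add used _ _).2 (Or.inr rfl))
            refine ⟨?_, ?_, fun x hx => IH3 x ((PySem.Set.mem_add used _ _).2 (Or.inl hx)), fun x hx => ?_⟩
            · rw [IH1]
              simp only [splitB]
              split
              · simp
              · rename_i hcond; exact absurd ⟨hlen.symm, hd⟩ hcond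
            · rw [remFrom_cons motifs _ k hstop, if_pos hk_in, List.nil_append, IH2]
              simp only [splitB]
              split
              · rfl
              · rename_i hcond; exact absurd ⟨hlen.symm, hd⟩ hcond
            · rcases IH4 x hx with h | h
              · rcases (PySem.Set.mem_add used _ _).1 h with h' | rfl
                · exact Or.inl h'
                · right; omega
              · right; push_cast at h ⊢; omega
          · -- same length but too distant: stays behind
            simp only [innerA, hm2, hc, hbne, Bool.or_self, Bool.false_eq_true, if_false]
            rw [if_neg hd]
            obtain ⟨IH1, IH2, IH3, IH4⟩ := ih (k + 1) cluster used (by omega)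
            have hk_out : (k : Int) ∉ (innerA motifs m1 d
                (PySem.List.pyRange ((k + 1 : Nat) : Int) (PySem.List.len motifs))
                cluster used).2 := by
              intro hx
              rcases IH4 _ hx with h | h
              · exact hused h
              · push_cast at h; omega
            refine ⟨?_, ?_, IH3, fun x hx => ?_⟩
            · rw [IH1]
              simp only [splitB]
              split
              · rename_i hcond; exact absurd hcond.2 hd
              · rfl
            · rw [remFrom_cons motifs _ k hstop, if_neg hk_out, IH2, List.singleton_append]
              simp only [splitB]
              split
              · rename_i hcond; exact absurd hcond.2 hd
              · rfl
            · rcases IH4 x hx with h | h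
              · exact Or.inl h
              · right; push_cast at h ⊢; omega
        · -- different lengths: skipped
          have hbne : (PySem.Str.len m1 != PySem.Str.len motifs[k]) = true := by
            rw [bne_iff_ne]; exact hlen
          simp only [innerA, hm2, hc, hbne, Bool.or_true, if_true]
          obtain ⟨IH1, IH2, IH3, IH4⟩ := ih (k + 1) cluster used (by omega)
          have hk_out : (k : Int) ∉ (innerA motifs m1 d
              (PySem.List.pyRange ((k + 1 : Nat) : Int) (PySem.List.len motifs))
              cluster used).2 := by
            intro hx
            rcases IH4 _ hx with h | h
            · exact hused h
            · push_cast at h; omega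
          refine ⟨?_, ?_, IH3, fun x hx => ?_⟩
          · rw [IH1]
            simp only [splitB]
            split
            · rename_i hcond; exact absurd hcond.1.symm hlen
            · rfl
          · rw [remFrom_cons motifs _ k hstop, if_neg hk_out, IH2, List.singleton_append]
            simp only [splitB]
            split
            · rename_i hcond; exact absurd hcond.1.symm hlen
            · rfl
          · rcases IH4 x hx with h | h
            · exact Or.inl h
            · right; push_cast at h ⊢; omega

theorem outerA_spec (motifs : List String) (d : Int) :
    ∀ (n k : Nat) (clusters : List (List String)) (used : PySem.Set Int),
      motifs.length ≤ k + n →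
      outerA motifs d (PySem.List.enumerate (motifs.drop k) (k : Int)) clusters used
        = clusters ++ clustersB d (remFrom motifs used k) := by
  intro n
  induction n with
  | zero =>
    intro k clusters used hkn
    rw [List.drop_eq_nil_of_le (by omega), PySem.List.enumerate_nil,
      remFrom_stop motifs used k (by omega)]
    simp [outerA, clustersB]
  | succ n ih =>
    intro k clusters used hkn
    by_cases hstop : motifs.length ≤ k
    · rw [List.drop_eq_nil_of_le hstop, PySem.List.enumerate_nil,
        remFrom_stop motifs used k hstop]
      simp [outerA, clustersB]
    · rw [not_le] at hstop
      rw [List.drop_eq_getElem_cons hstop, PySem.List.enumerate_cons]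
      have hcast : ((k : Int) + 1) = ((k + 1 : Nat) : Int) := by push_cast; ring
      by_cases hused : (k : Int) ∈ used
      · have hc : PySem.Set.contains used (k : Int) = true :=
          (PySem.Set.contains_iff used _).2 hused
        simp only [outerA, hc, if_true]
        rw [hcast, ih (k + 1) clusters used (by omega),
          remFrom_cons motifs used k hstop, if_pos hused, List.nil_append]
      · have hc : PySem.Set.contains used (k : Int) = false := by
          rw [← Bool.not_eq_true, PySem.Set.contains_iff]; exact hused
        simp only [outerA, hc, Bool.false_eq_true, if_false]
        rw [hcast]
        obtain ⟨IH1, IH2, IH3, IH4⟩ :=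
          innerA_spec motifs motifs[k] d motifs.length (k + 1) [motifs[k]]
            (PySem.Set.add used (k : Int)) (by omega)
        have hrem : remFrom motifs (PySem.Set.add used (k : Int)) (k + 1) = remFrom motifs used (k + 1) := by
          apply remFrom_congr
          intro j hj
          rw [PySem.Set.mem_add]
          constructor
          · rintro (hju | rfl)
            · exact hju
            · exfalso; push_cast at hj; omega
          · exact Or.inl
        rw [hrem] at IH1 IH2
        rw [ih (k + 1) _ _ (by omega), IH2, IH1,
          remFrom_cons motifs used k hstop, if_neg hused]
        have hcl : clustersB d ([motifs[k]] ++ remFrom motifs used (k + 1)) =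
            (motifs[k] :: (splitB motifs[k] d (remFrom motifs used (k + 1))).1)
              :: clustersB d (splitB motifs[k] d (remFrom motifs used (k + 1))).2 := by
          rw [List.singleton_append, clustersB]
        rw [hcl]
        simp

-- ===== VERDICT (by name: the statement is the Claim_ definition above) =====
theorem merge_similar_motifs_spec : Claim_equal_merge_similar_motifs := by
  intro motifs d _
  unfold Spec_merge_similar_motifs merge_similar_motifs merge_similar_motifs_alt
  have h0 : remFrom motifs PySem.Set.empty 0 = motifs := by
    unfold remFrom
    have hf : ∀ l : List Int, List.filter (fun j => !PySem.Set.empty.contains j) l = l :=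
      fun l => List.filter_eq_self.2 (fun a _ => rfl)
    rw [hf]
    have := PySem.List.map_pyGetD_pyRange_zero' motifs ""
    simpa using this
  have henum : PySem.List.enumerate motifs = PySem.List.enumerate (motifs.drop 0) ((0 : Nat) : Int) := by
    simp
  rw [henum, outerA_spec motifs d motifs.length 0 [] PySem.Set.empty (by omega), h0,
    List.nil_append, mergeB_eq_map]
  exact List.map_congr_left (fun cl _ => consensus_eq cl)
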